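-- pv_equiv track=rewrite | github.com/TakeshiKu/Import_Pragmatica | scripts/functions/parse_functions.py | consolidate_functions
-- ===== SOURCE A (Python) =====
-- from typing import List, Dict, Optional
--
-- def sort_key_for_code(code: str):
--     """Ключ для осмысленной сортировки: F1.2.10 -> [1, 2, 10]."""
--     if not code:
--         return []
--
--     body = code[1:]
--     parts = body.split(".")
--     key = []
--     for p in parts:
--         if p.isdigit():
--             key.append(int(p))
--         else:
--             key.append(p)
--     return key
--
-- def consolidate_functions(functions: List[Dict[str, str]]) -> List[Dict[str, str]]:
--     """Схлопывает дубликаты по коду."""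
--     by_code: Dict[str, Dict[str, str]] = {}
--     extras: Dict[str, List[str]] = {}
--
--     functions_sorted = sorted(functions, key=lambda f: sort_key_for_code(f["Func_LCN"]))
--
--     for f in functions_sorted:
--         code = f["Func_LCN"]
--         name = f.get("Name", "").strip()
--         parent = f.get("Parent_LCN", "")
--
--         if code not in by_code:
--             by_code[code] = {
--                 "Func_LCN": code,
--                 "Parent_LCN": parent,
--                 "Name": name,
--             }
--         else:
--             if name:
--                 extras.setdefault(code, []).append(name)
--
--     result: List[Dict[str, str]] = []
--
--     for code in sorted(by_code.keys(), key=sort_key_for_code):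
--         base = by_code[code]
--         desc_list = extras.get(code, [])
--         desc_text = ""
--         if desc_list:
--             desc_text = "\n".join(sorted(set(d for d in desc_list if d)))
--
--         result.append(
--             {
--                 "Func_LCN": base["Func_LCN"],
--                 "Parent_LCN": base["Parent_LCN"],
--                 "Name": base["Name"],
--                 "Description": desc_text,
--             }
--         )
--
--     return result
-- ===== SOURCE B (Python) =====
-- def sort_key_for_code(code: str):
--     if not code:
--         return []
--     body = code[1:]
--     parts = body.split(".")
--     key = []
--     for p in parts:
--         if p.isdigit():
--             key.append(int(p))
--         else:
--             key.append(p)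
--     return key
--
-- def consolidate_functions(functions):
--     # Selection recursion: repeatedly pick the code with the smallest sort key
--     # (earliest record wins ties), emit its consolidated row, recurse on the rest.
--     # No sorting and no dictionaries at all.
--     if not functions:
--         return []
--     best, bk = functions[0]["Func_LCN"], sort_key_for_code(functions[0]["Func_LCN"])
--     for r in functions[1:]:
--         k = sort_key_for_code(r["Func_LCN"])
--         if k < bk:
--             best, bk = r["Func_LCN"], k
--     group = [r for r in functions if r["Func_LCN"] == best]
--     rest = [r for r in functions if r["Func_LCN"] != best]
--     base = group[0]
--     names = [r.get("Name", "").strip() for r in group[1:]]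
--     row = {
--         "Func_LCN": best,
--         "Parent_LCN": base.get("Parent_LCN", ""),
--         "Name": base.get("Name", "").strip(),
--         "Description": "\n".join(sorted(set(n for n in names if n))),
--     }
--     return [row] + consolidate_functions(rest)
-- ===== Notes on version B (the rewrite author's own statement) =====
-- stated objective: alternative
-- what changed: B uses no sort and no dictionaries at all: it recursively selects the code with the smallest sort key (earliest record wins ties) by a linear scan, consolidates that code's records by two filters, emits the row and recurses on the remaining records.
import Mathlib
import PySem

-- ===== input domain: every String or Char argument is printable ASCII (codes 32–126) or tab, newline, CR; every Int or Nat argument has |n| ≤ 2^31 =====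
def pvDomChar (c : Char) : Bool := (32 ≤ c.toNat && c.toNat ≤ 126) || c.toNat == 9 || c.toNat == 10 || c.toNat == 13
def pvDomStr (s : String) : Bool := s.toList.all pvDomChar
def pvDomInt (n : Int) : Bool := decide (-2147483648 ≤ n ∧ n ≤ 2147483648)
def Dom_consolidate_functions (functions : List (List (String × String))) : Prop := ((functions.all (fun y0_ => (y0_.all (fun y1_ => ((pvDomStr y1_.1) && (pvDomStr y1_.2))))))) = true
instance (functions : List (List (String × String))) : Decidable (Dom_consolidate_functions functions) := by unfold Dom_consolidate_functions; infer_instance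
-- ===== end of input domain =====

-- B replaces A's full sort plus two parallel dicts by a selection recursion with no sort and
-- no dictionaries: pick the minimal-key code by a linear scan, filter out its records, recurse.

-- ===== PORT A =====
-- key elements of sort_key_for_code: int parts on the left, string parts on the right
-- (Python raises TypeError when an int part meets a str part; Pre_ excludes those inputs)
abbrev pvKE := Lex (Int ⊕ String)

-- port of sort_key_for_code (module helper used by both implementations)
def sortKeyForCode (code : String) : List pvKE :=
  if code = "" then []
  else
    -- code[1:]; body.split("."): sep "." ≠ "" so split? is always some
    ((PySem.Str.split? (PySem.Str.slice code (some 1) none) ".").getD []).foldl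
      (fun key p =>
        if PySem.Str.strIsdigit p then
          -- int(p): p.isdigit() guarantees ofStr? = some, the default 0 is never used
          key ++ [toLex (Sum.inl ((PySem.Int.ofStr? p).getD 0))]
        else key ++ [toLex (Sum.inr p)]) []

-- f["Func_LCN"] (present under Pre_), f.get("Name", "").strip(), f.get("Parent_LCN", "")
def codeOf (f : List (String × String)) : String := (PySem.Dict.mk f).getD "Func_LCN" ""
def nameOf (f : List (String × String)) : String :=
  PySem.Str.strip ((PySem.Dict.mk f).getD "Name" "")
def parentOf (f : List (String × String)) : String := (PySem.Dict.mk f).getD "Parent_LCN" ""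

-- body of A's first loop: by_code / extras
def pvAStep (st : PySem.Dict String (List (String × String)) × PySem.Dict String (List String))
    (f : List (String × String)) :
    PySem.Dict String (List (String × String)) × PySem.Dict String (List String) :=
  let code := codeOf f
  let name := nameOf f
  if st.1.contains code = false then
    (st.1.insert code [("Func_LCN", code), ("Parent_LCN", parentOf f), ("Name", name)], st.2)
  else if name != "" then (st.1, st.2.modify code [] (fun l => l ++ [name]))
  else st

-- body of A's second loop: one result row
def pvARow (by_code : PySem.Dict String (List (String × String)))
    (extras : PySem.Dict String (List String)) (code : String) : List (String × String) :=
  let base := by_code.getD code []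
  let desc_list := extras.getD code []
  let desc_text :=
    if desc_list = [] then ""
    else PySem.Str.join "\n"
      (PySem.List.sorted (PySem.Set.ofList (desc_list.filter (fun d => d != ""))) (fun x => x))
  [("Func_LCN", (PySem.Dict.mk base).getD "Func_LCN" ""),
   ("Parent_LCN", (PySem.Dict.mk base).getD "Parent_LCN" ""),
   ("Name", (PySem.Dict.mk base).getD "Name" ""),
   ("Description", desc_text)]

def consolidate_functions (functions : List (List (String × String))) : List (List (String × String)) :=
  let functions_sorted := PySem.List.sorted functions (fun f => sortKeyForCode (codeOf f))
  let st := functions_sorted.foldl pvAStep (PySem.Dict.empty, PySem.Dict.empty)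
  (PySem.List.sorted st.1.keys sortKeyForCode).foldl
    (fun result code => result ++ [pvARow st.1 st.2 code]) []

-- ===== PORT B =====
-- B's selection scan: running (best, bk) pair over the remaining records
def pvSelect (b0 : String × List pvKE) (rest : List (List (String × String))) :
    String × List pvKE :=
  rest.foldl (fun bb r =>
    if sortKeyForCode (codeOf r) < bb.2 then (codeOf r, sortKeyForCode (codeOf r)) else bb) b0

-- the selected best code is the code of some record (needed for termination of B's recursion)
theorem pvSelect_mem (rest : List (List (String × String))) (b0 : String × List pvKE) :
    (pvSelect b0 rest).1 = b0.1 ∨ (pvSelect b0 rest).1 ∈ rest.map codeOf := by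
  induction rest generalizing b0 with
  | nil => left; rfl
  | cons r t ih =>
    simp only [pvSelect, List.foldl_cons] at *
    by_cases h : sortKeyForCode (codeOf r) < b0.2
    · rw [if_pos h]
      rcases ih (codeOf r, sortKeyForCode (codeOf r)) with h1 | h1
      · right; rw [h1]; simp
      · right; simp [h1]
    · rw [if_neg h]
      rcases ih b0 with h1 | h1
      · left; exact h1
      · right; simp [h1]

-- the rest of B's recursion is strictly shorter (cited by decreasing_by)
theorem pv_rest_lt (f0 : List (String × String)) (fs : List (List (String × String))) :
    ((f0 :: fs).filter
      (fun r => codeOf r != (pvSelect (codeOf f0, sortKeyForCode (codeOf f0)) fs).1)).length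
      < (f0 :: fs).length := by
  rw [List.length_filter_lt_length_iff_exists]
  rcases pvSelect_mem fs (codeOf f0, sortKeyForCode (codeOf f0)) with h | h
  · exact ⟨f0, by simp, by simp [h]⟩
  · obtain ⟨g, hg, hgc⟩ := List.mem_map.mp h
    exact ⟨g, by simp [hg], by simp [hgc]⟩

def consolidate_functions_alt : List (List (String × String)) → List (List (String × String))
  | [] => []
  | f0 :: fs =>
    let best := (pvSelect (codeOf f0, sortKeyForCode (codeOf f0)) fs).1
    let group := (f0 :: fs).filter (fun r => codeOf r == best)
    let base := group.headD []
    let names := group.tail.map nameOf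
    [("Func_LCN", best), ("Parent_LCN", parentOf base), ("Name", nameOf base),
     ("Description", PySem.Str.join "\n"
       (PySem.List.sorted (PySem.Set.ofList (names.filter (fun n => n != ""))) (fun x => x)))]
      :: consolidate_functions_alt ((f0 :: fs).filter (fun r => codeOf r != best))
  termination_by l => l.length
  decreasing_by exact pv_rest_lt f0 fs

-- ===== PRECONDITION & SPEC =====
-- two sort keys are comparable in Python iff before their first disagreement no int part
-- meets a str part (int < str raises TypeError)
def pvKeyCompat : List pvKE → List pvKE → Bool
  | [], _ => true
  | _ :: _, [] => true
  | a :: t1, b :: t2 =>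
    match ofLex a, ofLex b with
    | Sum.inl x, Sum.inl y => if x = y then pvKeyCompat t1 t2 else true
    | Sum.inr x, Sum.inr y => if x = y then pvKeyCompat t1 t2 else true
    | _, _ => false

-- Pre_ excludes exactly the inputs on which Python A raises: a record without the
-- "Func_LCN" key (KeyError in f["Func_LCN"]) or two codes whose sort keys mix an int part
-- with a str part at the first difference (TypeError when the keys are compared)
def Pre_consolidate_functions (functions : List (List (String × String))) : Prop :=
  (∀ f ∈ functions, (PySem.Dict.mk f).contains "Func_LCN" = true) ∧
  (∀ f ∈ functions, ∀ g ∈ functions,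
    pvKeyCompat (sortKeyForCode (codeOf f)) (sortKeyForCode (codeOf g)) = true)
instance (functions : List (List (String × String))) : Decidable (Pre_consolidate_functions functions) := by unfold Pre_consolidate_functions; infer_instance

def pvWitness_consolidate_functions : (List (List (String × String))) :=
  [[("Func_LCN", "F1.2"), ("Name", "alpha"), ("Parent_LCN", "F1")],
   [("Func_LCN", "F1.2"), ("Name", "beta")],
   [("Func_LCN", "F1.10"), ("Name", "gamma")]]

def Spec_consolidate_functions (functions : List (List (String × String))) (out : List (List (String × String))) : Prop := out = consolidate_functions_alt functions
instance (functions : List (List (String × String))) (out : List (List (String × String))) : Decidable (Spec_consolidate_functions functions out) := by unfold Spec_consolidate_functions; infer_instance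

-- ===== CLAIM (what is proved, stated in full; the proofs are below) =====
def Claim_equal_consolidate_functions : Prop := ∀ (functions : List (List (String × String))), Dom_consolidate_functions functions → Pre_consolidate_functions functions → Spec_consolidate_functions functions (consolidate_functions functions)

-- ===== LEMMAS AND PROOFS =====

-- the common canonical form both proofs target: the row of one code, built from the
-- original-order records of that code, and the map over the sorted distinct codes
def pvRow (recs : List (List (String × String))) (c : String) : List (String × String) :=
  let grp := recs.filter (fun r => codeOf r == c)
  [("Func_LCN", c), ("Parent_LCN", parentOf (grp.headD [])), ("Name", nameOf (grp.headD [])),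
   ("Description", PySem.Str.join "\n"
     (PySem.List.sorted (PySem.Set.ofList ((grp.tail.map nameOf).filter (fun n => n != "")))
       (fun x => x)))]

def pvCanon (recs : List (List (String × String))) : List (List (String × String)) :=
  (PySem.List.sorted (PySem.Set.ofList (recs.map codeOf)) sortKeyForCode).map (pvRow recs)

-- the Lean instance the ports' `sorted` elaborates with (core List.lt) is propositionally
-- the lexicographic order of the LinearOrder instance; this bridge lets the order lemmas apply
theorem pv_sorted_bridge {α : Type} (xs : List α) (key : α → List pvKE) :
    PySem.List.sorted xs key =
      @PySem.List.sorted α (List pvKE) List.instLinearOrder.toLT LinearOrder.toDecidableLT xs key false := by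
  rw [PySem.List.sorted_eq_foldl_insertBy,
      @PySem.List.sorted_eq_foldl_insertBy α (List pvKE) List.instLinearOrder.toLT LinearOrder.toDecidableLT xs key]
  congr 1
  funext acc x
  congr 1
  funext a b
  exact decide_eq_decide.mpr (List.lt_iff_lex_lt _ _)

theorem pv_sorted_pairwise {α : Type} (xs : List α) (key : α → List pvKE) :
    (PySem.List.sorted xs key).Pairwise (fun a b => key a ≤ key b) := by
  rw [pv_sorted_bridge]
  exact PySem.List.sorted_pairwise xs key

theorem pv_sorted_eq_self {α : Type} (xs : List α) (key : α → List pvKE)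
    (h : xs.Pairwise (fun a b => key a ≤ key b)) :
    PySem.List.sorted xs key = xs := by
  rw [pv_sorted_bridge]
  exact PySem.List.sorted_eq_self_of_pairwise xs key h

theorem pv_sorted_append {α : Type} (l : List α) (x : α) (key : α → List pvKE) :
    PySem.List.sorted (l ++ [x]) key =
      PySem.List.insertBy (fun a b => decide (key a < key b)) x (PySem.List.sorted l key) := by
  rw [PySem.List.sorted_eq_foldl_insertBy, PySem.List.sorted_eq_foldl_insertBy, List.foldl_append]
  rfl

theorem pv_filter_insertBy {α : Type} (key : α → List pvKE) (x : α) (acc : List α)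
    (hacc : acc.Pairwise (fun a b => key a ≤ key b)) (p : α → Bool)
    (hp : ∀ y, p x = true → p y = true → key y = key x) :
    (PySem.List.insertBy (fun a b => decide (key a < key b)) x acc).filter p =
      if p x then acc.filter p ++ [x] else acc.filter p := by
  induction acc with
  | nil =>
    by_cases hx : p x = true <;> simp [PySem.List.insertBy, List.filter, hx]
  | cons y ys ih =>
    have hy_le : ∀ z ∈ ys, key y ≤ key z := (List.pairwise_cons.mp hacc).1
    have htail : ys.Pairwise (fun a b => key a ≤ key b) := (List.pairwise_cons.mp hacc).2
    by_cases hb : decide (key x < key y) = true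
    · have hlt : key x < key y := of_decide_eq_true hb
      rw [show PySem.List.insertBy (fun a b => decide (key a < key b)) x (y :: ys)
            = x :: y :: ys by simp [PySem.List.insertBy, hb]]
      by_cases hx : p x = true
      · have hnil : List.filter p (y :: ys) = [] := by
          rw [List.filter_eq_nil_iff]
          intro z hz hpz
          have hzx : key z = key x := hp z hx hpz
          have hyz : key y ≤ key z := by
            rcases List.mem_cons.mp hz with rfl | hz'
            · exact le_refl _
            · exact hy_le z hz'
          rw [hzx] at hyz
          exact absurd hlt (Std.not_lt.mpr hyz)
        rw [List.filter_cons_of_pos hx, hnil, if_pos hx]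
        simp
      · have hx' : p x = false := by simpa using hx
        rw [List.filter_cons_of_neg (by simp [hx']), if_neg (by simp [hx'])]
    · have hb' : decide (key x < key y) = false := by simpa using hb
      rw [show PySem.List.insertBy (fun a b => decide (key a < key b)) x (y :: ys)
            = y :: PySem.List.insertBy (fun a b => decide (key a < key b)) x ys by
          simp [PySem.List.insertBy, hb']]
      have ihh := ih htail
      by_cases hx : p x = true <;> by_cases hyp : p y = true <;>
        simp [List.filter, hx, hyp, ihh]

-- STABILITY: a predicate that is constant on the sort key filters identically before and
-- after sorting
theorem pv_filter_sorted {α : Type} (l : List α) (key : α → List pvKE) (p : α → Bool)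
    (hp : ∀ x y, p x = true → p y = true → key x = key y) :
    (PySem.List.sorted l key).filter p = l.filter p := by
  induction l using List.reverseRecOn with
  | nil => rfl
  | append_singleton l x ih =>
    rw [pv_sorted_append, pv_filter_insertBy key x _ (pv_sorted_pairwise l key) p
          (fun y hx hy => hp y x hy hx), List.filter_append]
    by_cases hx : p x = true
    · rw [if_pos hx, ih, show List.filter p [x] = [x] by simp [hx]]
    · have hx' : p x = false := by simpa using hx
      rw [if_neg (by simp [hx']), ih, show List.filter p [x] = [] by simp [hx']]
      simp

-- sorting commutes with mapping when the key factors through the map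
theorem pv_map_insertBy {α β : Type} (g : α → β) (key : β → List pvKE) (x : α) (acc : List α) :
    (PySem.List.insertBy (fun a b => decide (key (g a) < key (g b))) x acc).map g =
      PySem.List.insertBy (fun a b => decide (key a < key b)) (g x) (acc.map g) := by
  induction acc with
  | nil => simp [PySem.List.insertBy]
  | cons y ys ih =>
    by_cases hb : decide (key (g x) < key (g y)) = true
    · simp [PySem.List.insertBy, hb]
    · have hb' : decide (key (g x) < key (g y)) = false := by simpa using hb
      simp [PySem.List.insertBy, hb', ih]

theorem pv_map_sorted {α β : Type} (l : List α) (g : α → β) (key : β → List pvKE) :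
    (PySem.List.sorted l (fun a => key (g a))).map g = PySem.List.sorted (l.map g) key := by
  induction l using List.reverseRecOn with
  | nil => rfl
  | append_singleton l x ih =>
    rw [pv_sorted_append, pv_map_insertBy, ih, List.map_append]
    exact (pv_sorted_append (l.map g) (g x) key).symm

theorem pv_ofList_append {α : Type} [BEq α] (xs : List α) (x : α) :
    PySem.Set.ofList (xs ++ [x]) = PySem.Set.add (PySem.Set.ofList xs) x := by
  rw [PySem.Set.ofList_eq_foldl, PySem.Set.ofList_eq_foldl, List.foldl_append]
  rfl

theorem pv_ofList_sublist {α : Type} [BEq α] [LawfulBEq α] (xs : List α) :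
    (PySem.Set.ofList xs).Sublist xs := by
  induction xs using List.reverseRecOn with
  | nil => simp [PySem.Set.ofList]
  | append_singleton xs x ih =>
    rw [pv_ofList_append, PySem.Set.add]
    by_cases h : (PySem.Set.ofList xs).contains x = true
    · simp only [h, if_pos]
      exact ih.trans (List.sublist_append_left xs [x])
    · simp only [h]
      exact ih.append (List.Sublist.refl [x])

theorem pv_ofList_filter {α : Type} [BEq α] [LawfulBEq α] (xs : List α) (p : α → Bool) :
    (PySem.Set.ofList xs).filter p = PySem.Set.ofList (xs.filter p) := by
  induction xs using List.reverseRecOn with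
  | nil => simp [PySem.Set.ofList]
  | append_singleton xs x ih =>
    rw [pv_ofList_append, List.filter_append, PySem.Set.add, PySem.Set.contains]
    by_cases hx : x ∈ PySem.Set.ofList xs
    · have hx' : x ∈ xs := (PySem.Set.mem_ofList xs x).mp hx
      simp only [List.contains_eq_mem, hx, decide_true, if_pos]
      by_cases hp : p x = true
      · have hxf : x ∈ xs.filter p := List.mem_filter.mpr ⟨hx', hp⟩
        rw [show List.filter p [x] = [x] by simp [hp]]
        rw [pv_ofList_append, PySem.Set.add]
        have : (PySem.Set.ofList (xs.filter p)).contains x = true := by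
          simp [PySem.Set.contains, List.contains_eq_mem, (PySem.Set.mem_ofList _ x).mpr hxf]
        simp [ih, hx', hp]
      · have hp' : p x = false := by simpa using hp
        simp [hp', ih]
    · simp only [List.contains_eq_mem, hx, decide_false, Bool.false_eq_true]
      have hx' : x ∉ xs := fun h => hx ((PySem.Set.mem_ofList xs x).mpr h)
      by_cases hp : p x = true
      · rw [show List.filter p [x] = [x] by simp [hp]]
        rw [pv_ofList_append, PySem.Set.add]
        have : (PySem.Set.ofList (xs.filter p)).contains x = false := by
          simp only [PySem.Set.contains, List.contains_eq_mem, PySem.Set.mem_ofList,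
            decide_eq_false_iff_not]
          exact fun hh => hx' (List.mem_of_mem_filter hh)
        rw [this]
        simp [ih, hp]
      · have hp' : p x = false := by simpa using hp
        simp [hp', ih]

theorem pv_ofList_perm {α : Type} [BEq α] [LawfulBEq α] {xs ys : List α} (h : xs.Perm ys) :
    (PySem.Set.ofList xs).Perm (PySem.Set.ofList ys) := by
  rw [List.perm_ext_iff_of_nodup (PySem.Set.nodup_ofList xs) (PySem.Set.nodup_ofList ys)]
  intro a
  rw [PySem.Set.mem_ofList, PySem.Set.mem_ofList]
  exact h.mem_iff

-- UNIQUENESS of a stable order: two lists that are permutations of each other, both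
-- key-monotone, and agree on every tie class are equal
theorem pv_uniq {α : Type} (key : α → List pvKE) :
    ∀ (l1 l2 : List α), l1.Perm l2 →
      l1.Pairwise (fun a b => key a ≤ key b) → l2.Pairwise (fun a b => key a ≤ key b) →
      (∀ v, l1.filter (fun x => decide (key x = v)) = l2.filter (fun x => decide (key x = v))) →
      l1 = l2 := by
  intro l1
  induction l1 with
  | nil =>
    intro l2 h _ _ _
    exact (List.perm_nil.mp h.symm).symm
  | cons x t1 ih =>
    intro l2 h hp1 hp2 hfilt
    cases l2 with
    | nil => exact absurd h (by simp)
    | cons y t2 =>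
      have hxmem : x ∈ y :: t2 := h.subset (List.mem_cons_self)
      have hymem : y ∈ x :: t1 := h.symm.subset (List.mem_cons_self)
      have hle1 : key y ≤ key x := by
        rcases List.mem_cons.mp hxmem with rfl | hx'
        · exact le_refl _
        · exact (List.pairwise_cons.mp hp2).1 x hx'
      have hle2 : key x ≤ key y := by
        rcases List.mem_cons.mp hymem with heq | hy'
        · rw [heq]
        · exact (List.pairwise_cons.mp hp1).1 y hy'
      have hxy : key x = key y := le_antisymm hle2 hle1
      have hf := hfilt (key x)
      rw [List.filter_cons_of_pos (by simp), List.filter_cons_of_pos (by simp [hxy])] at hf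
      have hxyv : x = y := (List.cons.injEq _ _ _ _ ▸ hf).1
      subst hxyv
      have htails : t1 = t2 := by
        apply ih t2 h.cons_inv (List.pairwise_cons.mp hp1).2 (List.pairwise_cons.mp hp2).2
        intro v
        by_cases hv : v = key x
        · subst hv
          exact (List.cons.injEq _ _ _ _ ▸ hf).2
        · have hxv : (decide (key x = v)) = false := by
            simp
            exact fun hh => hv hh.symm
          have := hfilt v
          rwa [List.filter_cons_of_neg (by simp [hxv]), List.filter_cons_of_neg (by simp [hxv])] at this
      rw [htails]

-- characterisation of A's first loop
theorem pv_afold_spec (l : List (List (String × String))) :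
    ((l.foldl pvAStep (PySem.Dict.empty, PySem.Dict.empty)).1.keys
        = PySem.Set.ofList (l.map codeOf))
    ∧ (∀ c, (l.foldl pvAStep (PySem.Dict.empty, PySem.Dict.empty)).1.getD c [] =
        (match l.filter (fun f => codeOf f == c) with
         | [] => []
         | f0 :: _ => [("Func_LCN", c), ("Parent_LCN", parentOf f0), ("Name", nameOf f0)]))
    ∧ (∀ c, (l.foldl pvAStep (PySem.Dict.empty, PySem.Dict.empty)).2.getD c [] =
        ((l.filter (fun f => codeOf f == c)).tail.map nameOf).filter (fun n => n != "")) := by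
  induction l using List.reverseRecOn with
  | nil =>
    refine ⟨rfl, fun c => ?_, fun c => ?_⟩ <;> simp
  | append_singleton l f ih =>
    obtain ⟨ih1, ih2, ih3⟩ := ih
    set F := l.foldl pvAStep (PySem.Dict.empty, PySem.Dict.empty) with hF
    rw [List.foldl_append]
    simp only [List.foldl_cons, List.foldl_nil, List.map_append, List.map_cons, List.map_nil]
    by_cases hc : F.1.contains (codeOf f) = false
    · -- first occurrence of this code
      have hmem : codeOf f ∉ l.map codeOf := by
        intro hmm
        have : F.1.contains (codeOf f) = true :=
          (PySem.Dict.contains_iff_mem_keys _ _).mpr (ih1 ▸ (PySem.Set.mem_ofList _ _).mpr hmm)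
        rw [this] at hc
        exact absurd hc (by simp)
      have hnotin : (PySem.Set.ofList (l.map codeOf)).contains (codeOf f) = false := by
        simp only [PySem.Set.contains, List.contains_eq_mem, decide_eq_false_iff_not,
          PySem.Set.mem_ofList]
        exact hmem
      have hfl : ∀ c, codeOf f = c → l.filter (fun g => codeOf g == c) = [] := by
        intro c hcc
        rw [List.filter_eq_nil_iff]
        intro g hg hgc
        exact hmem (hcc ▸ (beq_iff_eq.mp hgc) ▸ List.mem_map_of_mem hg)
      have hstep : pvAStep F f =
          (F.1.insert (codeOf f)
            [("Func_LCN", codeOf f), ("Parent_LCN", parentOf f), ("Name", nameOf f)], F.2) := by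
        simp [pvAStep, hc]
      rw [hstep]
      refine ⟨?_, fun c => ?_, fun c => ?_⟩
      · rw [PySem.Dict.keys_insert_of_not_contains, ih1, pv_ofList_append, PySem.Set.add, hnotin]
        · simp
        · exact hc
      · rw [PySem.Dict.getD_insert, List.filter_append]
        by_cases hcc : c = codeOf f
        · rw [if_pos hcc, hfl c hcc.symm]
          simp [hcc]
        · have hbeq : (codeOf f == c) = false := by
            rw [beq_eq_false_iff_ne]; exact fun h => hcc h.symm
          rw [if_neg hcc, ih2 c]
          simp [hbeq]
      · rw [List.filter_append, ih3 c]
        by_cases hcc : c = codeOf f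
        · rw [hfl c hcc.symm]
          simp [hcc]
        · have hbeq : (codeOf f == c) = false := by
            rw [beq_eq_false_iff_ne]; exact fun h => hcc h.symm
          simp [hbeq]
    · -- the code was seen before
      have hc' : F.1.contains (codeOf f) = true := by simpa using hc
      have hmem : codeOf f ∈ l.map codeOf := by
        have := (PySem.Dict.contains_iff_mem_keys _ _).mp hc'
        rwa [ih1, PySem.Set.mem_ofList] at this
      have hin : (PySem.Set.ofList (l.map codeOf)).contains (codeOf f) = true := by
        simp only [PySem.Set.contains, List.contains_eq_mem, decide_eq_true_eq,
          PySem.Set.mem_ofList]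
        exact hmem
      have hkeys : PySem.Set.ofList (l.map codeOf ++ [codeOf f]) = PySem.Set.ofList (l.map codeOf) := by
        rw [pv_ofList_append, PySem.Set.add, hin]
        simp
      have hflne : l.filter (fun g => codeOf g == codeOf f) ≠ [] := by
        obtain ⟨g, hg, hgc⟩ := List.mem_map.mp hmem
        intro hnil
        have : g ∈ l.filter (fun g => codeOf g == codeOf f) :=
          List.mem_filter.mpr ⟨hg, by simp [hgc]⟩
        simp [hnil] at this
      by_cases hn : (nameOf f != "") = true
      · have hstep : pvAStep F f =
            (F.1, F.2.modify (codeOf f) [] (fun r => r ++ [nameOf f])) := by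
          simp [pvAStep, hc', hn]
        rw [hstep]
        refine ⟨?_, fun c => ?_, fun c => ?_⟩
        · rw [ih1, hkeys]
        · rw [List.filter_append, ih2 c]
          by_cases hcc : c = codeOf f
          · subst hcc
            rcases hxs : l.filter (fun g => codeOf g == codeOf f) with _ | ⟨g0, rest⟩
            · exact absurd hxs hflne
            · simp
          · have hbeq : (codeOf f == c) = false := by
              rw [beq_eq_false_iff_ne]; exact fun h => hcc h.symm
            simp [hbeq]
        · rw [List.filter_append]
          by_cases hcc : c = codeOf f
          · subst hcc
            rw [PySem.Dict.getD_modify_self, ih3 (codeOf f)]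
            rcases hxs : l.filter (fun g => codeOf g == codeOf f) with _ | ⟨g0, rest⟩
            · exact absurd hxs hflne
            · simp [hn]
          · have hbeq : (codeOf f == c) = false := by
              rw [beq_eq_false_iff_ne]; exact fun h => hcc h.symm
            rw [PySem.Dict.getD_modify_of_ne _ _ _ (fun h => hcc h), ih3 c]
            simp [hbeq]
      · have hn' : (nameOf f != "") = false := by simpa using hn
        have hstep : pvAStep F f = (F.1, F.2) := by
          simp [pvAStep, hc', hn']
        rw [hstep]
        refine ⟨?_, fun c => ?_, fun c => ?_⟩
        · rw [ih1, hkeys]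
        · rw [List.filter_append, ih2 c]
          by_cases hcc : c = codeOf f
          · subst hcc
            rcases hxs : l.filter (fun g => codeOf g == codeOf f) with _ | ⟨g0, rest⟩
            · exact absurd hxs hflne
            · simp
          · have hbeq : (codeOf f == c) = false := by
              rw [beq_eq_false_iff_ne]; exact fun h => hcc h.symm
            simp [hbeq]
        · rw [List.filter_append, ih3 c]
          by_cases hcc : c = codeOf f
          · subst hcc
            rcases hxs : l.filter (fun g => codeOf g == codeOf f) with _ | ⟨g0, rest⟩
            · exact absurd hxs hflne
            · simp [hn']
          · have hbeq : (codeOf f == c) = false := by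
              rw [beq_eq_false_iff_ne]; exact fun h => hcc h.symm
            simp [hbeq]

-- A's and B's description text agree: A guards with `if desc_list:` and filters the
-- already-filtered list again, the canonical form joins directly (join of [] is "")
theorem pv_desc_eq (M : List String) :
    (if M.filter (fun n => n != "") = [] then ""
     else PySem.Str.join "\n"
       (PySem.List.sorted
         (PySem.Set.ofList ((M.filter (fun n => n != "")).filter (fun d => d != "")))
         (fun x => x)))
    = PySem.Str.join "\n"
        (PySem.List.sorted (PySem.Set.ofList (M.filter (fun n => n != ""))) (fun x => x)) := by
  rw [List.filter_filter]
  simp only [Bool.and_self]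
  by_cases h : M.filter (fun n => n != "") = []
  · rw [if_pos h, h]
    rfl
  · rw [if_neg h]

-- A equals the canonical form
theorem pv_mainA (functions : List (List (String × String))) :
    consolidate_functions functions = pvCanon functions := by
  obtain ⟨ha1, ha2, ha3⟩ :=
    pv_afold_spec (PySem.List.sorted functions (fun f => sortKeyForCode (codeOf f)))
  simp only [consolidate_functions, pvCanon]
  rw [PySem.List.foldl_append_singleton_eq_map]
  simp only [List.nil_append]
  rw [ha1]
  set S := PySem.List.sorted functions (fun f => sortKeyForCode (codeOf f)) with hS
  -- A's final sort of the (already key-sorted) distinct codes is the identity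
  have hpwS : (S.map codeOf).Pairwise (fun a b => sortKeyForCode a ≤ sortKeyForCode b) :=
    List.pairwise_map.mpr (pv_sorted_pairwise functions _)
  have hpwOf : (PySem.Set.ofList (S.map codeOf)).Pairwise
      (fun a b => sortKeyForCode a ≤ sortKeyForCode b) :=
    hpwS.sublist (pv_ofList_sublist _)
  rw [pv_sorted_eq_self _ _ hpwOf]
  -- the canonical sorted distinct codes are A's distinct sorted codes
  have hmapS : S.map codeOf = PySem.List.sorted (functions.map codeOf) sortKeyForCode :=
    pv_map_sorted functions codeOf sortKeyForCode
  have horder : PySem.List.sorted (PySem.Set.ofList (functions.map codeOf)) sortKeyForCode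
      = PySem.Set.ofList (S.map codeOf) := by
    rw [hmapS]
    apply pv_uniq sortKeyForCode
    · exact (PySem.List.sorted_perm _ _ _).trans
        (pv_ofList_perm (PySem.List.sorted_perm _ _ _).symm)
    · exact pv_sorted_pairwise _ _
    · exact (pv_sorted_pairwise (functions.map codeOf) _).sublist (pv_ofList_sublist _)
    · intro v
      have hp : ∀ x y, decide (sortKeyForCode x = v) = true →
          decide (sortKeyForCode y = v) = true → sortKeyForCode x = sortKeyForCode y :=
        fun x y hx hy => (of_decide_eq_true hx).trans (of_decide_eq_true hy).symm
      rw [pv_filter_sorted _ _ _ hp, pv_ofList_filter, pv_ofList_filter,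
        pv_filter_sorted _ _ _ hp]
  rw [horder]
  -- the two rows agree on every surviving code
  apply List.map_congr_left
  intro c hcmem
  have hc2 : c ∈ S.map codeOf := (PySem.Set.mem_ofList _ _).mp hcmem
  have hp : ∀ x y, (codeOf x == c) = true → (codeOf y == c) = true →
      sortKeyForCode (codeOf x) = sortKeyForCode (codeOf y) :=
    fun x y hx hy => by rw [beq_iff_eq.mp hx, beq_iff_eq.mp hy]
  have hfilt : S.filter (fun f => codeOf f == c) = functions.filter (fun f => codeOf f == c) :=
    pv_filter_sorted functions _ _ hp
  have hne : functions.filter (fun f => codeOf f == c) ≠ [] := by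
    obtain ⟨f, hf, hfc⟩ := List.mem_map.mp hc2
    rw [hS, PySem.List.mem_sorted] at hf
    intro hnil
    have : f ∈ functions.filter (fun f => codeOf f == c) :=
      List.mem_filter.mpr ⟨hf, by simp [hfc]⟩
    simp [hnil] at this
  rcases hxs : functions.filter (fun f => codeOf f == c) with _ | ⟨f0, rest⟩
  · exact absurd hxs hne
  · simp only [pvARow, pvRow]
    rw [ha2 c, ha3 c, hfilt, hxs]
    simp only [List.tail_cons, List.headD_cons]
    rw [pv_desc_eq (rest.map nameOf)]
    simp [PySem.Dict.getD_eq_get?_getD, PySem.Dict.get?_mk_cons]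

-- ===== B-side lemmas =====

-- selection over the codes only
def pvSelC (c0 : String) (cs : List String) : String :=
  cs.foldl (fun b c => if sortKeyForCode c < sortKeyForCode b then c else b) c0

theorem pv_select_eq (rest : List (List (String × String))) (c0 : String) :
    pvSelect (c0, sortKeyForCode c0) rest =
      (pvSelC c0 (rest.map codeOf), sortKeyForCode (pvSelC c0 (rest.map codeOf))) := by
  induction rest generalizing c0 with
  | nil => rfl
  | cons r t ih =>
    simp only [pvSelect, pvSelC, List.foldl_cons, List.map_cons] at *
    by_cases h : sortKeyForCode (codeOf r) < sortKeyForCode c0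
    · rw [if_pos h, if_pos h]
      exact ih (codeOf r)
    · rw [if_neg h, if_neg h]
      exact ih c0

theorem pv_selC_min (cs : List String) (c0 : String) :
    sortKeyForCode (pvSelC c0 cs) ≤ sortKeyForCode c0 ∧
      ∀ c ∈ cs, sortKeyForCode (pvSelC c0 cs) ≤ sortKeyForCode c := by
  induction cs generalizing c0 with
  | nil => exact ⟨le_refl _, by simp⟩
  | cons c t ih =>
    simp only [pvSelC, List.foldl_cons]
    by_cases h : sortKeyForCode c < sortKeyForCode c0
    · rw [if_pos h]
      obtain ⟨h1, h2⟩ := ih c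
      refine ⟨h1.trans (le_of_lt h), fun x hx => ?_⟩
      rcases List.mem_cons.mp hx with rfl | hx'
      · exact h1
      · exact h2 x hx'
    · rw [if_neg h]
      obtain ⟨h1, h2⟩ := ih c0
      refine ⟨h1, fun x hx => ?_⟩
      rcases List.mem_cons.mp hx with rfl | hx'
      · exact h1.trans (Std.not_lt.mp h)
      · exact h2 x hx'

-- the selected code splits the list: everything before it has a strictly larger key
theorem pv_selC_split (cs : List String) (c0 : String) :
    ∃ l1 l2, c0 :: cs = l1 ++ pvSelC c0 cs :: l2 ∧
      ∀ x ∈ l1, sortKeyForCode (pvSelC c0 cs) < sortKeyForCode x := by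
  induction cs generalizing c0 with
  | nil => exact ⟨[], [], by simp [pvSelC], by simp⟩
  | cons c t ih =>
    by_cases h : sortKeyForCode c < sortKeyForCode c0
    · rw [show pvSelC c0 (c :: t) = pvSelC c t from by
        simp only [pvSelC, List.foldl_cons, if_pos h]]
      obtain ⟨l1, l2, hsp, hgt⟩ := ih c
      refine ⟨c0 :: l1, l2, by rw [List.cons_append, ← hsp], fun x hx => ?_⟩
      rcases List.mem_cons.mp hx with rfl | hx'
      · exact lt_of_le_of_lt (pv_selC_min t c).1 h
      · exact hgt x hx'
    · rw [show pvSelC c0 (c :: t) = pvSelC c0 t from by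
        simp only [pvSelC, List.foldl_cons, if_neg h]]
      have hc0c : sortKeyForCode c0 ≤ sortKeyForCode c := Std.not_lt.mp h
      obtain ⟨l1, l2, hsp, hgt⟩ := ih c0
      cases l1 with
      | nil =>
        have hs : pvSelC c0 t = c0 := by
          have := hsp
          simp only [List.nil_append] at this
          exact ((List.cons.injEq _ _ _ _).mp this).1.symm
        have hl2 : l2 = t := by
          have := hsp
          simp only [List.nil_append] at this
          exact ((List.cons.injEq _ _ _ _).mp this).2.symm
        exact ⟨[], c :: t, by rw [hs]; simp, by simp⟩
      | cons y l1' =>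
        have hy : c0 = y := by
          have := hsp
          rw [List.cons_append] at this
          exact ((List.cons.injEq _ _ _ _).mp this).1
        have ht : t = l1' ++ pvSelC c0 t :: l2 := by
          have := hsp
          rw [List.cons_append] at this
          exact ((List.cons.injEq _ _ _ _).mp this).2
        have hlt0 : sortKeyForCode (pvSelC c0 t) < sortKeyForCode c0 := by
          have := hgt y (by simp)
          rwa [← hy] at this
        refine ⟨c0 :: c :: l1', l2, ?_, fun x hx => ?_⟩
        · rw [List.cons_append, List.cons_append, ← ht]
        · rcases List.mem_cons.mp hx with rfl | hx'
          · exact hlt0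
          rcases List.mem_cons.mp hx' with rfl | hx''
          · exact lt_of_lt_of_le hlt0 hc0c
          · exact hgt x (by rw [← hy]; exact List.mem_cons_of_mem _ hx'')

theorem pv_selC_first (cs : List String) (c0 : String) :
    ∃ t, (c0 :: cs).filter
        (fun x => decide (sortKeyForCode x = sortKeyForCode (pvSelC c0 cs))) =
      pvSelC c0 cs :: t := by
  obtain ⟨l1, l2, hsp, hgt⟩ := pv_selC_split cs c0
  rw [hsp, List.filter_append, List.filter_cons_of_pos (by simp)]
  have hl1 : l1.filter
      (fun x => decide (sortKeyForCode x = sortKeyForCode (pvSelC c0 cs))) = [] := by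
    rw [List.filter_eq_nil_iff]
    intro x hx hdx
    exact absurd (of_decide_eq_true hdx).symm (ne_of_lt (hgt x hx))
  rw [hl1]
  exact ⟨_, rfl⟩

theorem pv_foldl_add_prefix {α : Type} [BEq α] (xs : List α) (s : List α) :
    ∃ t, xs.foldl PySem.Set.add s = s ++ t := by
  induction xs generalizing s with
  | nil => exact ⟨[], by simp⟩
  | cons x t ih =>
    simp only [List.foldl_cons]
    obtain ⟨u, hu⟩ := ih (PySem.Set.add s x)
    rw [hu]
    by_cases h : PySem.Set.contains s x = true
    · have hx : s.contains x = true := h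
      exact ⟨u, by simp [PySem.Set.add, hx]⟩
    · have hx : s.contains x = false := by
        rcases Bool.eq_false_or_eq_true (s.contains x) with hh | hh
        · exact absurd hh h
        · exact hh
      exact ⟨x :: u, by simp [PySem.Set.add, hx]⟩

theorem pv_ofList_cons_head {α : Type} [BEq α] (x : α) (xs : List α) :
    ∃ t, PySem.Set.ofList (x :: xs) = x :: t := by
  rw [PySem.Set.ofList_eq_foldl]
  simp only [List.foldl_cons]
  have hadd : PySem.Set.add ([] : List α) x = [x] := by
    simp [PySem.Set.add, PySem.Set.contains]
  rw [hadd]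
  obtain ⟨u, hu⟩ := pv_foldl_add_prefix xs [x]
  exact ⟨u, by simpa using hu⟩

theorem pv_filter_comm {α : Type} (l : List α) (p q : α → Bool) :
    (l.filter p).filter q = (l.filter q).filter p := by
  rw [List.filter_filter, List.filter_filter]
  exact List.filter_congr fun x _ => Bool.and_comm _ _

-- head/tail decomposition of the sorted distinct codes under selection
theorem pv_head_tail (f0 : List (String × String)) (fs : List (List (String × String))) :
    PySem.List.sorted (PySem.Set.ofList (((f0 :: fs)).map codeOf)) sortKeyForCode =
      pvSelC (codeOf f0) (fs.map codeOf) ::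
        PySem.List.sorted
          (PySem.Set.ofList
            (((f0 :: fs).filter
              (fun r => codeOf r != pvSelC (codeOf f0) (fs.map codeOf))).map codeOf))
          sortKeyForCode := by
  obtain ⟨hmin0, hminT⟩ := pv_selC_min (fs.map codeOf) (codeOf f0)
  have hminL : ∀ c ∈ (f0 :: fs).map codeOf,
      sortKeyForCode (pvSelC (codeOf f0) (fs.map codeOf)) ≤ sortKeyForCode c := by
    intro c hc
    rw [List.map_cons] at hc
    rcases List.mem_cons.mp hc with rfl | hc'
    · exact hmin0
    · exact hminT c hc'
  have hp : ∀ (x y : String),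
      decide (sortKeyForCode x = sortKeyForCode (pvSelC (codeOf f0) (fs.map codeOf))) = true →
      decide (sortKeyForCode y = sortKeyForCode (pvSelC (codeOf f0) (fs.map codeOf))) = true →
      sortKeyForCode x = sortKeyForCode y :=
    fun x y hx hy => (of_decide_eq_true hx).trans (of_decide_eq_true hy).symm
  obtain ⟨t0, ht0⟩ := pv_selC_first (fs.map codeOf) (codeOf f0)
  have ht0' : ((f0 :: fs).map codeOf).filter
      (fun x => decide (sortKeyForCode x = sortKeyForCode (pvSelC (codeOf f0) (fs.map codeOf)))) =
      pvSelC (codeOf f0) (fs.map codeOf) :: t0 := by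
    simpa using ht0
  obtain ⟨t1, ht1⟩ := pv_ofList_cons_head (pvSelC (codeOf f0) (fs.map codeOf)) t0
  have hDfilt : (PySem.Set.ofList ((f0 :: fs).map codeOf)).filter
      (fun x => decide (sortKeyForCode x = sortKeyForCode (pvSelC (codeOf f0) (fs.map codeOf)))) =
      pvSelC (codeOf f0) (fs.map codeOf) :: t1 := by
    rw [pv_ofList_filter, ht0', ht1]
  -- the sorted distinct codes are nonempty and start with a record of minimal key
  have hbmemL : pvSelC (codeOf f0) (fs.map codeOf) ∈ (f0 :: fs).map codeOf := by
    have : pvSelC (codeOf f0) (fs.map codeOf) ∈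
        ((f0 :: fs).map codeOf).filter
          (fun x => decide (sortKeyForCode x = sortKeyForCode (pvSelC (codeOf f0) (fs.map codeOf)))) := by
      rw [ht0']; exact List.mem_cons_self
    exact List.mem_of_mem_filter this
  have hbmemD : pvSelC (codeOf f0) (fs.map codeOf) ∈ PySem.Set.ofList ((f0 :: fs).map codeOf) :=
    (PySem.Set.mem_ofList _ _).mpr hbmemL
  have hfiltS := pv_filter_sorted (PySem.Set.ofList ((f0 :: fs).map codeOf)) sortKeyForCode
    (fun x => decide (sortKeyForCode x = sortKeyForCode (pvSelC (codeOf f0) (fs.map codeOf)))) hp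
  -- S = sorted distinct codes; it is nonempty, so destructure it
  rcases hS : PySem.List.sorted (PySem.Set.ofList ((f0 :: fs).map codeOf)) sortKeyForCode
      with _ | ⟨s0, S'⟩
  · have : pvSelC (codeOf f0) (fs.map codeOf) ∈
        PySem.List.sorted (PySem.Set.ofList ((f0 :: fs).map codeOf)) sortKeyForCode :=
      (PySem.List.mem_sorted _ _ _ _).mpr hbmemD
    rw [hS] at this
    exact absurd this (by simp)
  -- the head has the minimal key
  have hpermS : (s0 :: S').Perm (PySem.Set.ofList ((f0 :: fs).map codeOf)) := by
    rw [← hS]; exact PySem.List.sorted_perm _ _ _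
  have hs0L : s0 ∈ (f0 :: fs).map codeOf :=
    (PySem.Set.mem_ofList _ _).mp (hpermS.subset List.mem_cons_self)
  have h1 : sortKeyForCode (pvSelC (codeOf f0) (fs.map codeOf)) ≤ sortKeyForCode s0 :=
    hminL s0 hs0L
  have hpw := pv_sorted_pairwise (PySem.Set.ofList ((f0 :: fs).map codeOf)) sortKeyForCode
  rw [hS] at hpw
  have hbmemS : pvSelC (codeOf f0) (fs.map codeOf) ∈ s0 :: S' :=
    hpermS.symm.subset hbmemD
  have h2 : sortKeyForCode s0 ≤ sortKeyForCode (pvSelC (codeOf f0) (fs.map codeOf)) := by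
    rcases List.mem_cons.mp hbmemS with heq | hmem'
    · rw [heq]
    · exact (List.pairwise_cons.mp hpw).1 _ hmem'
  have hkeq : sortKeyForCode s0 = sortKeyForCode (pvSelC (codeOf f0) (fs.map codeOf)) :=
    le_antisymm h2 h1
  -- head of the minimal-key tie class: s0 = selected code
  rw [hS] at hfiltS
  rw [List.filter_cons_of_pos (by simp [hkeq]), hDfilt] at hfiltS
  have hs0 : s0 = pvSelC (codeOf f0) (fs.map codeOf) :=
    ((List.cons.injEq _ _ _ _).mp hfiltS).1
  subst hs0
  -- it remains to identify the tail with the sorted remaining distinct codes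
  have hrestmap : (((f0 :: fs).filter
        (fun r => codeOf r != pvSelC (codeOf f0) (fs.map codeOf)))).map codeOf
      = ((f0 :: fs).map codeOf).filter (fun c => c != pvSelC (codeOf f0) (fs.map codeOf)) := by
    rw [List.filter_map]
    rfl
  have hnodup : (pvSelC (codeOf f0) (fs.map codeOf) :: S').Nodup :=
    hpermS.nodup_iff.mpr (PySem.Set.nodup_ofList _)
  obtain ⟨hbnotin, hndS'⟩ := List.nodup_cons.mp hnodup
  have hfilt_cons : (pvSelC (codeOf f0) (fs.map codeOf) :: S').filter
      (fun c => c != pvSelC (codeOf f0) (fs.map codeOf)) = S' := by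
    rw [List.filter_cons_of_neg (by simp)]
    exact List.filter_eq_self.mpr fun a ha => bne_iff_ne.mpr (fun h => hbnotin (h ▸ ha))
  have hofrest : PySem.Set.ofList (((f0 :: fs).filter
        (fun r => codeOf r != pvSelC (codeOf f0) (fs.map codeOf))).map codeOf)
      = (PySem.Set.ofList ((f0 :: fs).map codeOf)).filter
          (fun c => c != pvSelC (codeOf f0) (fs.map codeOf)) := by
    rw [hrestmap, ← pv_ofList_filter]
  rw [hofrest]
  congr 1
  refine (pv_uniq sortKeyForCode _ _ ?_ (pv_sorted_pairwise _ _)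
    ((List.pairwise_cons.mp hpw).2) ?_).symm
  · -- permutation
    refine (PySem.List.sorted_perm _ _ _).trans ?_
    refine (hpermS.filter (fun c => c != pvSelC (codeOf f0) (fs.map codeOf))).symm.trans ?_
    rw [hfilt_cons]
  · -- tie classes agree
    intro v
    have hpv : ∀ (x y : String), decide (sortKeyForCode x = v) = true →
        decide (sortKeyForCode y = v) = true → sortKeyForCode x = sortKeyForCode y :=
      fun x y hx hy => (of_decide_eq_true hx).trans (of_decide_eq_true hy).symm
    rw [pv_filter_sorted _ _ _ hpv, pv_filter_comm]
    conv_rhs => rw [← hfilt_cons]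
    rw [pv_filter_comm _ (fun c => c != pvSelC (codeOf f0) (fs.map codeOf)) (fun x => decide (sortKeyForCode x = v)),
      ← hS, pv_filter_sorted _ _ _ hpv]

-- B equals the canonical form
theorem pv_mainB (recs : List (List (String × String))) :
    consolidate_functions_alt recs = pvCanon recs := by
  generalize hn : recs.length = n
  induction n using Nat.strong_induction_on generalizing recs with
  | _ n ih =>
  cases recs with
  | nil =>
    simp [consolidate_functions_alt, pvCanon, PySem.Set.ofList, PySem.List.sorted_eq_nil_iff]
  | cons f0 fs =>
    have hrow := pv_select_eq fs (codeOf f0)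
    simp only [consolidate_functions_alt]
    rw [hrow]
    have hrest := pv_rest_lt f0 fs
    rw [hrow] at hrest
    have hIH := ih _ (hn ▸ hrest) ((f0 :: fs).filter
      (fun r => codeOf r != pvSelC (codeOf f0) (fs.map codeOf))) rfl
    conv_rhs => rw [pvCanon, pv_head_tail, List.map_cons]
    congr 1
    -- the emitted head rows coincide; the remaining rows are built from the same record groups
    rw [hIH, pvCanon]
    apply List.map_congr_left
    intro c hc
    have hcmem : c ∈ ((f0 :: fs).filter
        (fun r => codeOf r != pvSelC (codeOf f0) (fs.map codeOf))).map codeOf :=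
      (PySem.Set.mem_ofList _ _).mp ((PySem.List.mem_sorted _ _ _ _).mp hc)
    obtain ⟨g, hg, hgc⟩ := List.mem_map.mp hcmem
    have hgne : (codeOf g != pvSelC (codeOf f0) (fs.map codeOf)) = true :=
      (List.mem_filter.mp hg).2
    have hcne : c ≠ pvSelC (codeOf f0) (fs.map codeOf) := hgc ▸ bne_iff_ne.mp hgne
    have hgrp : ((f0 :: fs).filter
          (fun r => codeOf r != pvSelC (codeOf f0) (fs.map codeOf))).filter
            (fun r => codeOf r == c)
        = (f0 :: fs).filter (fun r => codeOf r == c) := by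
      rw [pv_filter_comm]
      apply List.filter_eq_self.mpr
      intro x hx
      have hxc : codeOf x = c := by
        have := (List.mem_filter.mp hx).2
        exact beq_iff_eq.mp this
      exact bne_iff_ne.mpr (hxc ▸ hcne)
    rw [pvRow, pvRow, hgrp]

-- ===== VERDICT (by name: the statement is the Claim_ definition above) =====
theorem consolidate_functions_spec : Claim_equal_consolidate_functions := by
  intro functions _ _
  unfold Spec_consolidate_functions
  rw [pv_mainA, pv_mainB]
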